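-- pv_equiv track=rewrite | github.com/vivesca/vivesca | cofactors/vigilia_journal.py | _parse_queue_section
-- ===== SOURCE A (Python) =====
-- def _parse_queue_section(content: str) -> dict:
--     """Parse completed/remaining/blocked lists from queue section."""
--     queue: dict[str, list] = {"completed": [], "remaining": [], "blocked": []}
--     current: str | None = None
--     for line in content.splitlines():
--         lower = line.strip().lower().rstrip(":")
--         if lower in ("completed", "remaining", "blocked"):
--             current = lower
--         elif line.strip().startswith("- ") and current:
--             item = line.strip()[2:]
--             if item != "(none)":
--                 queue[current].append(item)
--     return queue
-- ===== SOURCE B (Python) =====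
-- def _parse_queue_section(content: str) -> dict:
--     """Parse completed/remaining/blocked lists from queue section.
--
--     Reverse scan: walk the lines bottom-up buffering dash items; each header
--     line claims the buffered items below it (its section), lines above the
--     topmost header are left in the buffer and dropped."""
--     queue = {"completed": [], "remaining": [], "blocked": []}
--     pending = []
--     for line in reversed(content.splitlines()):
--         stripped = line.strip()
--         name = stripped.lower().rstrip(":")
--         if name in queue:
--             queue[name] = pending[::-1] + queue[name]
--             pending = []
--         elif stripped.startswith("- ") and stripped[2:] != "(none)":
--             pending.append(stripped[2:])
--     return queue
-- ===== Notes on version B (the rewrite author's own statement) =====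
-- stated objective: alternative
-- what changed: Replaces A's forward scan that tracks the current header in a state variable by a reversed (bottom-up) scan with a pending-items buffer: dash items are buffered and each header line claims the buffered items below it, so no current-section state exists and the output is built back-to-front.
import Mathlib
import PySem

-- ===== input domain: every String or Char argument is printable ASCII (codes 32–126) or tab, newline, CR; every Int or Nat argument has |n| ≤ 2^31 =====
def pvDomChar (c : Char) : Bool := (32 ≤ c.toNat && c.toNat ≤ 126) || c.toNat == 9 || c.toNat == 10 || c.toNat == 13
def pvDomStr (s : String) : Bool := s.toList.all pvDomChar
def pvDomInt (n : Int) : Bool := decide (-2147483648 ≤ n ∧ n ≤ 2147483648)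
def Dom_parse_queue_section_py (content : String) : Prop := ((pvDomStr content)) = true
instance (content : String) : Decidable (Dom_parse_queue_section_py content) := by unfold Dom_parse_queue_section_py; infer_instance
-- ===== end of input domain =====

-- B replaces A's forward scan with a `current`-header state machine by a REVERSED scan with a
-- pending-items buffer (each header claims the buffered items below it); same return value,
-- no speed claim.

-- ===== PORT A =====
-- line.rstrip(":") — drop ALL trailing ':' characters; no PySem primitive, exact hand port
def rstripColon (s : String) : String :=
  String.ofList ((s.toList.reverse.dropWhile (· == ':')).reverse)

-- loop body of A's single for-loop (state: (queue, current))
def stepA (st : PySem.Dict String (List String) × Option String) (line : String) :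
    PySem.Dict String (List String) × Option String :=
  let lower := rstripColon (PySem.Str.lower (PySem.Str.strip line))
  if lower == "completed" || lower == "remaining" || lower == "blocked" then
    (st.1, some lower)
  else
    match st.2 with
    | some cur =>
      -- 'and current': a Python str is truthy iff nonempty
      if PySem.Str.startswith (PySem.Str.strip line) "- " && cur != "" then
        let item := PySem.Str.slice (PySem.Str.strip line) (some 2) none
        if item != "(none)" then (st.1.modify cur [] (· ++ [item]), st.2) else st
      else st
    | none => st

def parse_queue_section_py (content : String) : List (String × List String) :=
  ((PySem.Str.splitlines content).foldl stepA
    (PySem.Dict.ofList [("completed", ([] : List String)), ("remaining", []), ("blocked", [])],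
      none)).1.items

-- ===== PORT B =====
-- loop body of B's reversed for-loop (state: (queue, pending))
def stepB (st : PySem.Dict String (List String) × List String) (line : String) :
    PySem.Dict String (List String) × List String :=
  let stripped := PySem.Str.strip line
  let name := rstripColon (PySem.Str.lower stripped)
  if st.1.contains name then
    -- queue[name] = pending[::-1] + queue[name]; pending = []
    (st.1.modify name [] (fun old => st.2.reverse ++ old), [])
  else if PySem.Str.startswith stripped "- " &&
      PySem.Str.slice stripped (some 2) none != "(none)" then
    (st.1, st.2 ++ [PySem.Str.slice stripped (some 2) none])
  else st

def parse_queue_section_py_alt (content : String) : List (String × List String) :=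
  -- for line in reversed(content.splitlines()): …
  (((PySem.Str.splitlines content).reverse.foldl stepB
    (PySem.Dict.ofList [("completed", ([] : List String)), ("remaining", []), ("blocked", [])],
      ([] : List String)))).1.items

-- ===== PRECONDITION & SPEC =====
def Spec_parse_queue_section_py (content : String) (out : List (String × List String)) : Prop := out = parse_queue_section_py_alt content
instance (content : String) (out : List (String × List String)) : Decidable (Spec_parse_queue_section_py content out) := by unfold Spec_parse_queue_section_py; infer_instance

-- ===== CLAIM (what is proved, stated in full; the proofs are below) =====
def Claim_equal_parse_queue_section_py : Prop := ∀ (content : String), Dom_parse_queue_section_py content → Spec_parse_queue_section_py content (parse_queue_section_py content)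

-- ===== LEMMAS AND PROOFS =====

-- proof-side helpers: the key of a line, whether it is a header, the item a line contributes,
-- the pure triple-state recursion A's fold is reduced to, and the segment grouping both sides meet at
def pvKey (line : String) : String := rstripColon (PySem.Str.lower (PySem.Str.strip line))

def pvHdr (line : String) : Bool :=
  pvKey line == "completed" || pvKey line == "remaining" || pvKey line == "blocked"

def pvExtract (line : String) : Option String :=
  if PySem.Str.startswith (PySem.Str.strip line) "- " &&
      PySem.Str.slice (PySem.Str.strip line) (some 2) none != "(none)"
  then some (PySem.Str.slice (PySem.Str.strip line) (some 2) none) else none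

def pvSpec : List String → List String → List String → List String → Option String →
    (List String × List String × List String) × Option String
  | [], x, y, z, cur => ((x, y, z), cur)
  | line :: rest, x, y, z, cur =>
    if pvKey line = "completed" ∨ pvKey line = "remaining" ∨ pvKey line = "blocked" then
      pvSpec rest x y z (some (pvKey line))
    else if cur = some "completed" then pvSpec rest (x ++ [line]) y z cur
    else if cur = some "remaining" then pvSpec rest x (y ++ [line]) z cur
    else if cur = some "blocked" then pvSpec rest x y (z ++ [line]) cur
    else pvSpec rest x y z cur

def pvOk (cur : Option String) : Prop :=
  cur = none ∨ cur = some "completed" ∨ cur = some "remaining" ∨ cur = some "blocked"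

def pvMkD (x y z : List String) : PySem.Dict String (List String) :=
  PySem.Dict.mk [("completed", x), ("remaining", y), ("blocked", z)]

-- prepend seg to the k-bucket of a triple
def pvAddK (k : String) (seg : List String)
    (t : List String × List String × List String) :
    List String × List String × List String :=
  if k = "completed" then (seg ++ t.1, t.2.1, t.2.2)
  else if k = "remaining" then (t.1, seg ++ t.2.1, t.2.2)
  else if k = "blocked" then (t.1, t.2.1, seg ++ t.2.2)
  else t

-- the segment view computed from the right: (buckets, items pending below the topmost header)
def pvGrpR : List String → (List String × List String × List String) × List String
  | [] => (([], [], []), [])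
  | l :: ls =>
    let r := pvGrpR ls
    if pvHdr l then (pvAddK (pvKey l) r.2 r.1, [])
    else (r.1, (pvExtract l).toList ++ r.2)

def pvF (t : List String × List String × List String) :
    List String × List String × List String :=
  (t.1.filterMap pvExtract, t.2.1.filterMap pvExtract, t.2.2.filterMap pvExtract)

def pvPlus (s t : List String × List String × List String) :
    List String × List String × List String :=
  (s.1 ++ t.1, s.2.1 ++ t.2.1, s.2.2 ++ t.2.2)

def pvC (cur : Option String) (ls : List String) :
    List String × List String × List String :=
  match cur with
  | none => (pvGrpR ls).1
  | some k => pvAddK k (pvGrpR ls).2 (pvGrpR ls).1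
lemma modify_completed (x y z : List String) (f : List String → List String) :
    (pvMkD x y z).modify "completed" [] f = pvMkD (f x) y z := by
  simp [pvMkD, PySem.Dict.modify, PySem.Dict.insert, PySem.Dict.getD, PySem.Dict.get?,
    PySem.Dict.contains]

lemma modify_remaining (x y z : List String) (f : List String → List String) :
    (pvMkD x y z).modify "remaining" [] f = pvMkD x (f y) z := by
  simp [pvMkD, PySem.Dict.modify, PySem.Dict.insert, PySem.Dict.getD, PySem.Dict.get?,
    PySem.Dict.contains]

lemma modify_blocked (x y z : List String) (f : List String → List String) :
    (pvMkD x y z).modify "blocked" [] f = pvMkD x y (f z) := by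
  simp [pvMkD, PySem.Dict.modify, PySem.Dict.insert, PySem.Dict.getD, PySem.Dict.get?,
    PySem.Dict.contains]

lemma contains_pvMkD (x y z : List String) (s : String) :
    (pvMkD x y z).contains s =
      (s == "completed" || s == "remaining" || s == "blocked") := by
  have bf : ∀ a b : String, a ≠ b → (a == b) = false := fun a b h => beq_eq_false_iff_ne.mpr h
  by_cases h1 : s = "completed"
  · subst h1; simp [pvMkD, PySem.Dict.contains, PySem.Dict.get?]
  · by_cases h2 : s = "remaining"
    · subst h2; simp [pvMkD, PySem.Dict.contains, PySem.Dict.get?]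
    · by_cases h3 : s = "blocked"
      · subst h3; simp [pvMkD, PySem.Dict.contains, PySem.Dict.get?]
      · simp [pvMkD, PySem.Dict.contains, PySem.Dict.get?, bf _ _ h1, bf _ _ h2, bf _ _ h3,
          bf _ _ (Ne.symm h1), bf _ _ (Ne.symm h2), bf _ _ (Ne.symm h3)]


lemma stepA_hdr (x y z : List String) (cur : Option String) (line : String)
    (h : pvKey line = "completed" ∨ pvKey line = "remaining" ∨ pvKey line = "blocked") :
    stepA (pvMkD x y z, cur) line = (pvMkD x y z, some (pvKey line)) := by
  rcases h with h1 | h1 | h1 <;> simp [stepA, pvKey] at h1 ⊢ <;> simp [h1]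

-- A's in-loop conditional append is exactly the extraction of the one raw line the spec stores
lemma stepA_item (x y z : List String) (line : String) (cur : String)
    (hcur : cur = "completed" ∨ cur = "remaining" ∨ cur = "blocked")
    (h1 : pvKey line ≠ "completed") (h2 : pvKey line ≠ "remaining") (h3 : pvKey line ≠ "blocked") :
    stepA (pvMkD (x.filterMap pvExtract) (y.filterMap pvExtract) (z.filterMap pvExtract), some cur) line
      = (pvMkD ((if cur = "completed" then x ++ [line] else x).filterMap pvExtract)
               ((if cur = "remaining" then y ++ [line] else y).filterMap pvExtract)
               ((if cur = "blocked" then z ++ [line] else z).filterMap pvExtract), some cur) := by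
  simp only [pvKey] at h1 h2 h3
  have hx : ∀ l : List String, (l ++ [line]).filterMap pvExtract
      = l.filterMap pvExtract ++ (pvExtract line).toList := by
    intro l
    cases hpe : pvExtract line <;>
      simp [List.filterMap_append, List.filterMap_cons, hpe]
  by_cases hs : PySem.Str.startswith (PySem.Str.strip line) "- " = true
  · by_cases hn : (PySem.Str.slice (PySem.Str.strip line) (some 2) none != "(none)") = true
    · simp at hs hn
      have he : pvExtract line = some (PySem.Str.slice (PySem.Str.strip line) (some 2) none) := by
        simp [pvExtract, hs, hn]
      rcases hcur with hc | hc | hc <;> subst hc <;>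
        simp [stepA, h1, h2, h3, hs, hn, modify_completed, modify_remaining,
          modify_blocked, hx, he]
    · simp at hs hn
      have he : pvExtract line = none := by simp [pvExtract, hs, hn]
      rcases hcur with hc | hc | hc <;> subst hc <;>
        simp [stepA, h1, h2, h3, hs, hn, hx, he]
  · simp at hs
    have he : pvExtract line = none := by simp [pvExtract, hs]
    rcases hcur with hc | hc | hc <;> subst hc <;>
      simp [stepA, h1, h2, h3, hs, hx, he]

lemma foldA_eq (lines : List String) : ∀ (x y z : List String) (cur : Option String), pvOk cur →
    lines.foldl stepA
        (pvMkD (x.filterMap pvExtract) (y.filterMap pvExtract) (z.filterMap pvExtract), cur)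
      = (pvMkD ((pvSpec lines x y z cur).1.1.filterMap pvExtract)
          ((pvSpec lines x y z cur).1.2.1.filterMap pvExtract)
          ((pvSpec lines x y z cur).1.2.2.filterMap pvExtract), (pvSpec lines x y z cur).2) := by
  induction lines with
  | nil => intro x y z cur _; simp [pvSpec]
  | cons line rest ih =>
    intro x y z cur hcur
    by_cases h : pvKey line = "completed" ∨ pvKey line = "remaining" ∨ pvKey line = "blocked"
    · have hok : pvOk (some (pvKey line)) := by
        rcases h with h1 | h1 | h1 <;> simp [pvOk, h1]
      have hspec : pvSpec (line :: rest) x y z cur = pvSpec rest x y z (some (pvKey line)) := by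
        simp [pvSpec, h]
      rw [List.foldl_cons, stepA_hdr _ _ _ cur line h, hspec, ih _ _ _ _ hok]
    · push_neg at h
      have hr := h
      simp only [pvKey] at hr
      rcases hcur with hc | hc | hc | hc <;> subst hc
      · have hstep : stepA (pvMkD (x.filterMap pvExtract) (y.filterMap pvExtract)
            (z.filterMap pvExtract), none) line
            = (pvMkD (x.filterMap pvExtract) (y.filterMap pvExtract) (z.filterMap pvExtract),
                none) := by
          simp [stepA, hr.1, hr.2.1, hr.2.2]
        have hspec : pvSpec (line :: rest) x y z none = pvSpec rest x y z none := by
          simp [pvSpec, h.1, h.2.1, h.2.2]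
        rw [List.foldl_cons, hstep, hspec]; exact ih _ _ _ _ (Or.inl rfl)
      · have hspec : pvSpec (line :: rest) x y z (some "completed")
            = pvSpec rest (x ++ [line]) y z (some "completed") := by
          simp [pvSpec, h.1, h.2.1, h.2.2]
        rw [List.foldl_cons, stepA_item x y z line "completed" (Or.inl rfl) h.1 h.2.1 h.2.2, hspec]
        simpa using ih (x ++ [line]) y z (some "completed") (Or.inr (Or.inl rfl))
      · have hspec : pvSpec (line :: rest) x y z (some "remaining")
            = pvSpec rest x (y ++ [line]) z (some "remaining") := by
          simp [pvSpec, h.1, h.2.1, h.2.2]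
        rw [List.foldl_cons, stepA_item x y z line "remaining" (Or.inr (Or.inl rfl)) h.1 h.2.1 h.2.2,
          hspec]
        simpa using ih x (y ++ [line]) z (some "remaining") (Or.inr (Or.inr (Or.inl rfl)))
      · have hspec : pvSpec (line :: rest) x y z (some "blocked")
            = pvSpec rest x y (z ++ [line]) (some "blocked") := by
          simp [pvSpec, h.1, h.2.1, h.2.2]
        rw [List.foldl_cons, stepA_item x y z line "blocked" (Or.inr (Or.inr rfl)) h.1 h.2.1 h.2.2,
          hspec]
        simpa using ih x y (z ++ [line]) (some "blocked") (Or.inr (Or.inr (Or.inr rfl)))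

lemma ofList_init :
    (PySem.Dict.ofList [("completed", ([] : List String)), ("remaining", []), ("blocked", [])])
      = pvMkD [] [] [] := by
  simp [pvMkD, PySem.Dict.ofList, PySem.Dict.update, PySem.Dict.insert, PySem.Dict.empty,
    PySem.Dict.contains]

lemma pvAddK_nil (k : String) (t : List String × List String × List String) :
    pvAddK k [] t = t := by
  unfold pvAddK; split_ifs <;> simp

-- A's left scan, filtered, equals the right-fold segment grouping
lemma spec_eq_grp (ls : List String) : ∀ (x y z : List String) (cur : Option String), pvOk cur →
    pvF (pvSpec ls x y z cur).1 = pvPlus (pvF (x, y, z)) (pvC cur ls) := by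
  induction ls with
  | nil =>
    intro x y z cur hcur
    rcases hcur with hc | hc | hc | hc <;> subst hc <;>
      simp [pvSpec, pvC, pvF, pvPlus, pvGrpR, pvAddK]
  | cons l ls ih =>
    intro x y z cur hcur
    by_cases h : pvKey l = "completed" ∨ pvKey l = "remaining" ∨ pvKey l = "blocked"
    · have hh : pvHdr l = true := by
        rcases h with h1 | h1 | h1 <;> simp [pvHdr, h1]
      have hspec : pvSpec (l :: ls) x y z cur = pvSpec ls x y z (some (pvKey l)) := by
        simp [pvSpec, h]
      have hok : pvOk (some (pvKey l)) := by
        rcases h with h1 | h1 | h1 <;> simp [pvOk, h1]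
      rw [hspec, ih _ _ _ _ hok]
      have hg : pvGrpR (l :: ls) = (pvAddK (pvKey l) (pvGrpR ls).2 (pvGrpR ls).1, []) := by
        simp [pvGrpR, hh]
      have hC : pvC cur (l :: ls) = pvC (some (pvKey l)) ls := by
        rcases hcur with hc | hc | hc | hc <;> subst hc <;>
          simp [pvC, hg, pvAddK_nil]
      rw [hC]
    · push_neg at h
      have hh : pvHdr l = false := by
        simp [pvHdr, h.1, h.2.1, h.2.2]
      have hfm : ∀ w : List String, (w ++ [l]).filterMap pvExtract
          = w.filterMap pvExtract ++ (pvExtract l).toList := by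
        intro w; cases hpe : pvExtract l <;> simp [List.filterMap_append, hpe]
      rcases hcur with hc | hc | hc | hc <;> subst hc
      · rw [show pvSpec (l :: ls) x y z none = pvSpec ls x y z none by
          simp [pvSpec, h.1, h.2.1, h.2.2]]
        rw [ih _ _ _ _ (Or.inl rfl)]
        simp [pvC, pvGrpR, hh]
      · rw [show pvSpec (l :: ls) x y z (some "completed")
            = pvSpec ls (x ++ [l]) y z (some "completed") by simp [pvSpec, h.1, h.2.1, h.2.2]]
        rw [ih _ _ _ _ (Or.inr (Or.inl rfl))]
        simp [pvC, pvF, pvPlus, pvAddK, pvGrpR, hh, hfm]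
      · rw [show pvSpec (l :: ls) x y z (some "remaining")
            = pvSpec ls x (y ++ [l]) z (some "remaining") by simp [pvSpec, h.1, h.2.1, h.2.2]]
        rw [ih _ _ _ _ (Or.inr (Or.inr (Or.inl rfl)))]
        simp [pvC, pvF, pvPlus, pvAddK, pvGrpR, hh, hfm]
      · rw [show pvSpec (l :: ls) x y z (some "blocked")
            = pvSpec ls x y (z ++ [l]) (some "blocked") by simp [pvSpec, h.1, h.2.1, h.2.2]]
        rw [ih _ _ _ _ (Or.inr (Or.inr (Or.inr rfl)))]
        simp [pvC, pvF, pvPlus, pvAddK, pvGrpR, hh, hfm]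

-- B's reversed fold lands on the same right-fold grouping
lemma foldB_eq (ls : List String) :
    ls.reverse.foldl stepB (pvMkD [] [] [], []) =
      (pvMkD (pvGrpR ls).1.1 (pvGrpR ls).1.2.1 (pvGrpR ls).1.2.2, (pvGrpR ls).2.reverse) := by
  induction ls with
  | nil => simp [pvGrpR]
  | cons l ls ih =>
    rw [List.reverse_cons, List.foldl_append, ih, List.foldl_cons, List.foldl_nil]
    have hkey : rstripColon (PySem.Str.lower (PySem.Str.strip l)) = pvKey l := rfl
    by_cases hk : pvKey l = "completed" ∨ pvKey l = "remaining" ∨ pvKey l = "blocked"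
    · have h : pvHdr l = true := by
        rcases hk with h1 | h1 | h1 <;> simp [pvHdr, h1]
      have hg : pvGrpR (l :: ls) = (pvAddK (pvKey l) (pvGrpR ls).2 (pvGrpR ls).1, []) := by
        simp [pvGrpR, h]
      rw [hg]
      rcases hk with h1 | h1 | h1 <;>
      · have hname : rstripColon (PySem.Str.lower (PySem.Str.strip l)) = _ := hkey.trans h1
        simp only [stepB]
        rw [hname, contains_pvMkD]
        simp [h1, pvAddK, modify_completed, modify_remaining, modify_blocked]
    · push_neg at hk
      have hb : pvHdr l = false := by simp [pvHdr, hk.1, hk.2.1, hk.2.2]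
      have hg : pvGrpR (l :: ls) = ((pvGrpR ls).1, (pvExtract l).toList ++ (pvGrpR ls).2) := by
        simp [pvGrpR, hb]
      rw [hg]
      simp only [stepB]
      rw [hkey, contains_pvMkD,
        show (pvKey l == "completed" || pvKey l == "remaining" || pvKey l == "blocked")
          = pvHdr l from rfl, hb]
      by_cases hc : (PySem.Str.startswith (PySem.Str.strip l) "- " &&
          PySem.Str.slice (PySem.Str.strip l) (some 2) none != "(none)") = true
      · have hpe : pvExtract l = some (PySem.Str.slice (PySem.Str.strip l) (some 2) none) := by
          unfold pvExtract; rw [if_pos hc]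
        simp [hpe]
        simpa using hc
      · have hpe : pvExtract l = none := by
          unfold pvExtract; rw [if_neg hc]
        simp [hpe]
        simpa using hc

-- ===== VERDICT (by name: the statement is the Claim_ definition above) =====
theorem parse_queue_section_py_spec : Claim_equal_parse_queue_section_py := by
  intro content _
  unfold Spec_parse_queue_section_py parse_queue_section_py parse_queue_section_py_alt
  rw [ofList_init]
  have hA := foldA_eq (PySem.Str.splitlines content) [] [] [] none (Or.inl rfl)
  simp only [List.filterMap_nil] at hA
  rw [hA, foldB_eq (PySem.Str.splitlines content)]
  have hS := spec_eq_grp (PySem.Str.splitlines content) [] [] [] none (Or.inl rfl)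
  simp only [pvC, pvF, pvPlus, List.filterMap_nil, List.nil_append, Prod.mk.injEq] at hS
  rw [hS.1, hS.2.1, hS.2.2]
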